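-- pv_equiv track=rewrite | github.com/mikedeen8/python2023 | chapter9/9_4.py | uses_only
-- ===== SOURCE A (Python) =====
-- def uses_only(word, letters):
--     for l in letters:
--         if l == ' ' or l == '.' or l == ','or l == '?' or l == '!':
--             pass
--         elif not l.upper() in word and not l.lower() in word:
--             return False
--     for c in word:
--         if c == ' ' or c == '.' or c == ',' or c == '?' or c == '!':
--             pass
--         elif not c.upper() in letters and not c.lower() in letters:
--             return False
--     return True
-- ===== SOURCE B (Python) =====
-- def uses_only(word, letters):
--     punct = ' .,?!'
--     sl = {c.lower() for c in letters if c not in punct}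
--     sw = {c.lower() for c in word if c not in punct}
--     return sl == sw
-- ===== Notes on version B (the rewrite author's own statement) =====
-- stated objective: faster
-- what changed: Replaces A's two directional per-character substring-scan loops (each char of one string scanned against the whole other string) with building two canonical lowercased punctuation-free character sets once and comparing them with a single set equality.
import Mathlib
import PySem

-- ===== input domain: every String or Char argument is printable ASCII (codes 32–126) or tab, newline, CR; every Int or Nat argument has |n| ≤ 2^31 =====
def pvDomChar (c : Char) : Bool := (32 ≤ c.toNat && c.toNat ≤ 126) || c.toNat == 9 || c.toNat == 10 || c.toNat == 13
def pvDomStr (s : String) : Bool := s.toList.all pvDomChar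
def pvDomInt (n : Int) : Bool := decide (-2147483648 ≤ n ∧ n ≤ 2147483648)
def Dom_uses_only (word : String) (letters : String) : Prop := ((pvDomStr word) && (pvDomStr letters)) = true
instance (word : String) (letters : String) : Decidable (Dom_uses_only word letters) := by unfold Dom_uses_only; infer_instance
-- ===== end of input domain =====

-- B builds two canonical lowercased punctuation-free character sets and compares them once,
-- replacing A's two directional membership-scan loops; same result, asymptotically fewer scans (measured faster in a timing run).

-- ===== PORT A =====
-- A's two 'for' loops are textually identical with the roles of the two strings swapped:
-- iterate over one string, skip ' .,?!', else require char.upper() or char.lower() to occur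
-- as a substring of the other string; both are transliterated by this one recursive loop.
def pvLoopA (container : List Char) : List Char → Bool
  | [] => true
  | l :: rest =>
    if l = ' ' ∨ l = '.' ∨ l = ',' ∨ l = '?' ∨ l = '!' then
      pvLoopA container rest
    else if !(PySem.Chars.isIn [PySem.Chars.upperChar l] container)
            && !(PySem.Chars.isIn [PySem.Chars.lowerChar l] container) then
      false
    else
      pvLoopA container rest

def uses_only (word : String) (letters : String) : Bool :=
  -- first loop: for l in letters … tested against word; if it returns False we stop (&&)
  pvLoopA word.toList letters.toList && pvLoopA letters.toList word.toList

-- ===== PORT B =====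
def pvPunctList : List Char := [' ', '.', ',', '?', '!']

-- {c.lower() for c in s if c not in punct}: the set comprehension inserts, in iteration
-- order, the lowered chars that pass the filter — PySem.Set.ofList of that list.
def pvCanon (s : List Char) : PySem.Set Char :=
  PySem.Set.ofList ((s.filter (fun c => !(PySem.Chars.isIn [c] pvPunctList))).map PySem.Chars.lowerChar)

def uses_only_alt (word : String) (letters : String) : Bool :=
  PySem.Set.equal (pvCanon letters.toList) (pvCanon word.toList)

-- ===== PRECONDITION & SPEC =====
def Spec_uses_only (word : String) (letters : String) (out : Bool) : Prop := out = uses_only_alt word letters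
instance (word : String) (letters : String) (out : Bool) : Decidable (Spec_uses_only word letters out) := by unfold Spec_uses_only; infer_instance

-- ===== CLAIM (what is proved, stated in full; the proofs are below) =====
def Claim_equal_uses_only : Prop := ∀ (word : String) (letters : String), Dom_uses_only word letters → Spec_uses_only word letters (uses_only word letters)

-- ===== LEMMAS AND PROOFS =====

-- a one-char substring test is membership
lemma pv_singleton_infix (c : Char) (s : List Char) : [c] <:+: s ↔ c ∈ s := by
  constructor
  · intro h; exact h.mem (by simp)
  · intro h
    obtain ⟨t, u, rfl⟩ := List.mem_iff_append.mp h
    exact ⟨t, u, by simp⟩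

lemma pv_isIn_singleton (c : Char) (s : List Char) :
    PySem.Chars.isIn [c] s = true ↔ c ∈ s := by
  rw [PySem.Chars.isIn_iff_infix, pv_singleton_infix]

def pvPunctB (c : Char) : Bool := c ∈ pvPunctList

-- the five per-character ASCII facts the equivalence rests on, bundled and decided over codes 0–126
def pvCharFacts (c : Char) : Prop :=
  PySem.Chars.lowerChar (PySem.Chars.upperChar c) = PySem.Chars.lowerChar c ∧
  PySem.Chars.lowerChar (PySem.Chars.lowerChar c) = PySem.Chars.lowerChar c ∧
  PySem.Chars.upperChar (PySem.Chars.lowerChar c) = PySem.Chars.upperChar c ∧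
  (pvPunctB (PySem.Chars.lowerChar c) = pvPunctB c ∧ pvPunctB (PySem.Chars.upperChar c) = pvPunctB c) ∧
  (c = PySem.Chars.lowerChar c ∨ c = PySem.Chars.upperChar (PySem.Chars.lowerChar c))

lemma pv_charFacts_of_lt : ∀ i : Fin 127, pvCharFacts (Char.ofNat i.val) := by
  unfold pvCharFacts; decide

lemma pv_charFacts (c : Char) (h : pvDomChar c = true) : pvCharFacts c := by
  have hlt : c.toNat < 127 := by
    simp [pvDomChar] at h
    rcases h with ⟨h1 | h2⟩ | h3
    · omega
    · omega
    · omega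
  have := pv_charFacts_of_lt ⟨c.toNat, hlt⟩
  simpa [Char.ofNat_toNat] using this

-- characterisation of A's loop
lemma pv_loopA_iff (W L : List Char) :
    pvLoopA W L = true ↔
      ∀ l ∈ L, pvPunctB l = false →
        (PySem.Chars.upperChar l ∈ W ∨ PySem.Chars.lowerChar l ∈ W) := by
  induction L with
  | nil => simp [pvLoopA]
  | cons l rest ih =>
    by_cases hp : l = ' ' ∨ l = '.' ∨ l = ',' ∨ l = '?' ∨ l = '!'
    · have hpb : pvPunctB l = true := by
        simp [pvPunctB, pvPunctList]
        rcases hp with h|h|h|h|h <;> simp [h]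
      simp only [pvLoopA, if_pos hp, ih]
      constructor
      · intro h x hx hnx
        rcases List.mem_cons.mp hx with rfl | hx
        · simp [hpb] at hnx
        · exact h x hx hnx
      · intro h x hx hnx; exact h x (List.mem_cons_of_mem _ hx) hnx
    · have hpb : pvPunctB l = false := by
        simp [pvPunctB, pvPunctList]
        push Not at hp
        exact ⟨hp.1, hp.2.1, hp.2.2.1, hp.2.2.2.1, hp.2.2.2.2⟩
      by_cases hm : PySem.Chars.upperChar l ∈ W ∨ PySem.Chars.lowerChar l ∈ W
      · have hcond : (!(PySem.Chars.isIn [PySem.Chars.upperChar l] W)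
            && !(PySem.Chars.isIn [PySem.Chars.lowerChar l] W)) = false := by
          rcases hm with hm | hm
          · simp [(pv_isIn_singleton _ _).mpr hm]
          · simp [(pv_isIn_singleton _ _).mpr hm]
        simp only [pvLoopA, if_neg hp, hcond, Bool.false_eq_true, if_false, ih]
        constructor
        · intro h x hx hnx
          rcases List.mem_cons.mp hx with rfl | hx
          · exact hm
          · exact h x hx hnx
        · intro h x hx hnx; exact h x (List.mem_cons_of_mem _ hx) hnx
      · push Not at hm
        have hcond : (!(PySem.Chars.isIn [PySem.Chars.upperChar l] W)
            && !(PySem.Chars.isIn [PySem.Chars.lowerChar l] W)) = true := by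
          have h1 : PySem.Chars.isIn [PySem.Chars.upperChar l] W = false := by
            rcases h : PySem.Chars.isIn [PySem.Chars.upperChar l] W
            · rfl
            · exact absurd ((pv_isIn_singleton _ _).mp h) hm.1
          have h2 : PySem.Chars.isIn [PySem.Chars.lowerChar l] W = false := by
            rcases h : PySem.Chars.isIn [PySem.Chars.lowerChar l] W
            · rfl
            · exact absurd ((pv_isIn_singleton _ _).mp h) hm.2
          simp [h1, h2]
        simp only [pvLoopA, if_neg hp, hcond, if_true]
        constructor
        · intro h; exact absurd h (by simp)
        · intro h
          exact absurd (h l (List.mem_cons_self) hpb) (by push Not; exact hm)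

-- membership in B's canonical set
lemma pv_canon_mem (s : List Char) (x : Char) :
    x ∈ pvCanon s ↔ ∃ c ∈ s, pvPunctB c = false ∧ PySem.Chars.lowerChar c = x := by
  simp only [pvCanon, PySem.Set.mem_ofList, List.mem_map, List.mem_filter]
  constructor
  · rintro ⟨c, ⟨hc, hf⟩, rfl⟩
    refine ⟨c, hc, ?_, rfl⟩
    have hni : PySem.Chars.isIn [c] pvPunctList = false := by simpa using hf
    have hnm : c ∉ pvPunctList := fun hmem => by
      simp [(pv_isIn_singleton c pvPunctList).mpr hmem] at hni
    simp [pvPunctB, hnm]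
  · rintro ⟨c, hc, hnp, rfl⟩
    refine ⟨c, ⟨hc, ?_⟩, rfl⟩
    have : PySem.Chars.isIn [c] pvPunctList = false := by
      rcases h : PySem.Chars.isIn [c] pvPunctList
      · rfl
      · have := (pv_isIn_singleton c pvPunctList).mp h
        simp [pvPunctB, this] at hnp
    simp [this]

-- ===== VERDICT (by name: the statement is the Claim_ definition above) =====
theorem uses_only_spec : Claim_equal_uses_only := by
  intro word letters hdom
  unfold Spec_uses_only
  have hdW : ∀ c ∈ word.toList, pvDomChar c = true := by
    have := (Bool.and_eq_true _ _).mp hdom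
    exact fun c hc => List.all_eq_true.mp this.1 c hc
  have hdL : ∀ c ∈ letters.toList, pvDomChar c = true := by
    have := (Bool.and_eq_true _ _).mp hdom
    exact fun c hc => List.all_eq_true.mp this.2 c hc
  set W := word.toList
  set L := letters.toList
  rw [Bool.eq_iff_iff]
  unfold uses_only uses_only_alt
  rw [Bool.and_eq_true, pv_loopA_iff, pv_loopA_iff, PySem.Set.equal_iff]
  constructor
  · rintro ⟨hLW, hWL⟩ x
    rw [pv_canon_mem, pv_canon_mem]
    constructor
    · rintro ⟨c, hc, hnp, rfl⟩
      obtain ⟨fa, fb, fd, ⟨fe1, fe2⟩, fc⟩ := pv_charFacts c (hdL c hc)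
      rcases hLW c hc hnp with hm | hm
      · exact ⟨_, hm, by rw [fe2]; exact hnp, fa⟩
      · exact ⟨_, hm, by rw [fe1]; exact hnp, fb⟩
    · rintro ⟨c, hc, hnp, rfl⟩
      obtain ⟨fa, fb, fd, ⟨fe1, fe2⟩, fc⟩ := pv_charFacts c (hdW c hc)
      rcases hWL c hc hnp with hm | hm
      · exact ⟨_, hm, by rw [fe2]; exact hnp, fa⟩
      · exact ⟨_, hm, by rw [fe1]; exact hnp, fb⟩
  · intro hset
    constructor
    · intro l hl hnp
      have hx : PySem.Chars.lowerChar l ∈ pvCanon L :=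
        (pv_canon_mem _ _).mpr ⟨l, hl, hnp, rfl⟩
      have hx' := (hset _).mp hx
      obtain ⟨c, hc, hnpc, heq⟩ := (pv_canon_mem _ _).mp hx'
      obtain ⟨fa, fb, fd, fe, fc⟩ := pv_charFacts c (hdW c hc)
      obtain ⟨fa', fb', fd', fe', fc'⟩ := pv_charFacts l (hdL l hl)
      rcases fc with hcl | hcu
      · right; rw [← heq, ← hcl]; exact hc
      · left; rw [heq, fd'] at hcu; rw [← hcu]; exact hc
    · intro l hl hnp
      have hx : PySem.Chars.lowerChar l ∈ pvCanon W :=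
        (pv_canon_mem _ _).mpr ⟨l, hl, hnp, rfl⟩
      have hx' := (hset _).mpr hx
      obtain ⟨c, hc, hnpc, heq⟩ := (pv_canon_mem _ _).mp hx'
      obtain ⟨fa, fb, fd, fe, fc⟩ := pv_charFacts c (hdL c hc)
      obtain ⟨fa', fb', fd', fe', fc'⟩ := pv_charFacts l (hdW l hl)
      rcases fc with hcl | hcu
      · right; rw [← heq, ← hcl]; exact hc
      · left; rw [heq, fd'] at hcu; rw [← hcu]; exact hc
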